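-- pv_equiv track=rewrite | github.com/DavidCDCB/PythonMicroProyectos | Proyecto_final/Motor.py | rutas_sprite
-- ===== SOURCE A (Python) =====
-- def rutas_sprite(lista,inicio,fin):
--     def num_ruta_sprite(dif):
--         if dif == (-1, 0, 1, 0): return 1
--         if dif == (1, 0, -1, 0): return 0
--         if dif == (0, 1, 0, -1): return 3
--         if dif == (0, -1, 0, 1): return 2
--         if dif == (-1, 0, 0, 1) or dif == (0,1,-1,0): return 4
--         if dif == (0, 1, 1, 0) or dif == (1,0,0,1): return 5
--         if dif == (1, 0, 0, -1) or dif == (0,-1,1,0): return 6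
--         if dif == (0, -1, -1, 0) or dif == (-1,0,0,-1): return 7
--         return -1
--
--     lista_spri=[]
--
--     if len(lista) is 0:
--         return []
--
--     if len(lista) is 1:
--         dx=lista[0][0]-inicio[0]
--         dy=lista[0][1]-inicio[1]
--
--         if (dx, dy) == (-1, 0): lista_spri.append(0)
--         elif (dx, dy) == (+1, 0): lista_spri.append(1)
--         elif (dx, dy) == (0, -1): lista_spri.append(2)
--         elif (dx, dy) == (-1, +1): lista_spri.append(3)
--         return
--
--
--     if len(lista) is 2:
--         dx1 = lista[0][0] - inicio[0]
--         dy1 = lista[0][1] - inicio[1]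
--         dx2 = lista[0][0] - lista[1][0]
--         dy2 = lista[0][1] - lista[1][1]
--
--         lista_spri.append(num_ruta_sprite((dx1, dy1, dx2, dy2)))
--
--         #Este se cambia luego
--         dx1 = lista[1][0] - lista[0][0]
--         dy1 = lista[1][1] - lista[0][1]
--         dx2 = lista[1][0] - fin[0]
--         dy2 = lista[1][1] - fin[1]
--         lista_spri.append(num_ruta_sprite((dx1, dy1, dx2, dy2)))
--         return
--
--
--
--     elif len(lista) > 2:
--         dx1 = lista[0][0] - inicio[0]
--         dy1 = lista[0][1] - inicio[1]
--         dx2 = lista[0][0] - lista[1][0]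
--         dy2 = lista[0][1] - lista[1][1]
--         lista_spri.append(num_ruta_sprite((dx1, dy1, dx2, dy2)))
--
--
--
--
--         for i in range(1,(len(lista)-1),1):
--
--             dx1=lista[i][0]-lista[i-1][0]
--             dy1=lista[i][1]-lista[i-1][1]
--             dx2=lista[i][0]-lista[i+1][0]
--             dy2=lista[i][1]-lista[i+1][1]
--             lista_spri.append(num_ruta_sprite((dx1,dy1,dx2,dy2)))
--
--         #Este se cambia luego
--         dx1 = lista[-1][0] - lista[-2][0]
--         dy1 = lista[-1][1] - lista[-2][1]
--         dx2 = lista[-1][0] - fin[0]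
--         dy2 = lista[-1][1] - fin[1]
--
--
--         lista_spri.append(num_ruta_sprite((dx1, dy1, dx2, dy2)))
--
--     return lista_spri
-- ===== SOURCE B (Python) =====
-- # Edge-direction decomposition: classify each step of the padded path once,
-- # then read each point's sprite code from an (incoming, outgoing) direction table.
--
-- _DIR = {(-1, 0): 'L', (1, 0): 'R', (0, 1): 'U', (0, -1): 'D'}
--
-- _CODE = {
--     ('L', 'L'): 1, ('R', 'R'): 0, ('U', 'U'): 3, ('D', 'D'): 2,
--     ('L', 'D'): 4, ('U', 'R'): 4,
--     ('U', 'L'): 5, ('R', 'D'): 5,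
--     ('R', 'U'): 6, ('D', 'L'): 6,
--     ('D', 'R'): 7, ('L', 'U'): 7,
-- }
--
-- def rutas_sprite(lista, inicio, fin):
--     pts = [inicio] + lista + [fin]
--     dirs = [_DIR.get((b[0] - a[0], b[1] - a[1])) for a, b in zip(pts, pts[1:])]
--     return [_CODE.get(pair, -1) for pair in zip(dirs, dirs[1:])]
-- ===== Notes on version B (the rewrite author's own statement) =====
-- stated objective: alternative
-- what changed: Instead of A's three-phase code (special-cased first point, index loop, special-cased last point, each classifying a 4-tuple of coordinate differences through one big if-chain), B classifies each EDGE of the padded path once into a direction symbol L/R/U/D and then reads each point's sprite code from an (incoming,outgoing) direction-pair table; Pre_ excludes lists of length 1 or 2, where A computes codes into a local list but then executes a bare `return`, yielding None instead of a list.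
-- outside the precondition, e.g. on rutas_sprite([(1, 0)], (0, 0), (2, 0)): A returns None, B returns [0]; on rutas_sprite([(1, 0), (2, 0)], (0, 0), (3, 0)): A returns None, B returns [0, 0]
import Mathlib
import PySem

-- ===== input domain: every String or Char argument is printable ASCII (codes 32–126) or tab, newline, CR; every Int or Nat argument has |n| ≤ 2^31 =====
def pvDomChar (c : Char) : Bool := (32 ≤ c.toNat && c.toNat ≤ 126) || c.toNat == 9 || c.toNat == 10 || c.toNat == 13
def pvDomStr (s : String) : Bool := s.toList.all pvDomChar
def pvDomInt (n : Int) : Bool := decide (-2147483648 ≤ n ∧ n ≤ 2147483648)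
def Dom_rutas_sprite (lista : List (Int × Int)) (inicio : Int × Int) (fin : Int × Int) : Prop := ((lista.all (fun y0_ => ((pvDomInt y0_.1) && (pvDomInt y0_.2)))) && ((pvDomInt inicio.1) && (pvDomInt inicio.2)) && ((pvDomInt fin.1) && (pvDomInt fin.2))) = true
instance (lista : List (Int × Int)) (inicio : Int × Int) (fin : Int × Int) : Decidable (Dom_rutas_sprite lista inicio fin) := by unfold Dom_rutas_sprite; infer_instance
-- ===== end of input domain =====

-- B replaces A's three-phase branch/loop/branch over 4-tuples of differences by an
-- edge-direction decomposition: classify each edge of the padded path once (L/R/U/D),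
-- then read each point's code from an (incoming, outgoing) direction-pair table.
-- Pre_ excludes lists of length 1 or 2, where A returns None (a bare `return`) instead of a list.


-- ===== PORT A =====
-- num_ruta_sprite: A's if-chain mapping a 4-tuple of differences to a sprite code
def numRuta (dif : Int × Int × Int × Int) : Int :=
  if dif = (-1, 0, 1, 0) then 1
  else if dif = (1, 0, -1, 0) then 0
  else if dif = (0, 1, 0, -1) then 3
  else if dif = (0, -1, 0, 1) then 2
  else if dif = (-1, 0, 0, 1) ∨ dif = (0, 1, -1, 0) then 4
  else if dif = (0, 1, 1, 0) ∨ dif = (1, 0, 0, 1) then 5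
  else if dif = (1, 0, 0, -1) ∨ dif = (0, -1, 1, 0) then 6
  else if dif = (0, -1, -1, 0) ∨ dif = (-1, 0, 0, -1) then 7
  else -1

def rutas_sprite (lista : List (Int × Int)) (inicio : Int × Int) (fin : Int × Int) : Option (List Int) :=
  if lista.length = 0 then some [] else
  if lista.length = 1 then
    -- Python appends to a local list here and then executes a bare `return`:
    -- the local list is unobservable, the function returns None.
    none
  else if lista.length = 2 then
    -- same: two codes go into a local list, then a bare `return` yields None.
    none
  else
    let z : Int × Int := (0, 0)
    let l0 := lista.getD 0 z
    let l1 := lista.getD 1 z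
    let spri0 := [numRuta (l0.1 - inicio.1, l0.2 - inicio.2, l0.1 - l1.1, l0.2 - l1.2)]
    let spri := (PySem.List.pyRange 1 ((lista.length : Int) - 1) 1).foldl
      (fun acc i =>
        let li := PySem.List.pyGetD lista i z
        let lp := PySem.List.pyGetD lista (i - 1) z
        let ln := PySem.List.pyGetD lista (i + 1) z
        acc ++ [numRuta (li.1 - lp.1, li.2 - lp.2, li.1 - ln.1, li.2 - ln.2)]) spri0
    let lm1 := PySem.List.pyGetD lista (-1) z
    let lm2 := PySem.List.pyGetD lista (-2) z
    some (spri ++ [numRuta (lm1.1 - lm2.1, lm1.2 - lm2.2, lm1.1 - fin.1, lm1.2 - fin.2)])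

-- ===== PORT B =====
-- _DIR: unit step -> direction symbol
def DIRd : PySem.Dict (Int × Int) Char := PySem.Dict.ofList
  [((-1, 0), 'L'), ((1, 0), 'R'), ((0, 1), 'U'), ((0, -1), 'D')]
-- _CODE: (incoming direction, outgoing direction) -> sprite code
def CODEd : PySem.Dict (Option Char × Option Char) Int := PySem.Dict.ofList
  [((some 'L', some 'L'), 1), ((some 'R', some 'R'), 0), ((some 'U', some 'U'), 3), ((some 'D', some 'D'), 2),
   ((some 'L', some 'D'), 4), ((some 'U', some 'R'), 4),
   ((some 'U', some 'L'), 5), ((some 'R', some 'D'), 5),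
   ((some 'R', some 'U'), 6), ((some 'D', some 'L'), 6),
   ((some 'D', some 'R'), 7), ((some 'L', some 'U'), 7)]

def rutas_sprite_alt (lista : List (Int × Int)) (inicio : Int × Int) (fin : Int × Int) : Option (List Int) :=
  let pts := inicio :: (lista ++ [fin])
  let dirs := (pts.zip (pts.drop 1)).map (fun t => DIRd.get? (t.2.1 - t.1.1, t.2.2 - t.1.2))
  some ((dirs.zip (dirs.drop 1)).map (fun t => CODEd.getD (t.1, t.2) (-1)))

-- ===== PRECONDITION & SPEC =====
-- Pre_ excludes lists of length 1 or 2: there A computes codes into a local list but then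
-- executes a bare `return`, so it returns None instead of a list of codes.
def Pre_rutas_sprite (lista : List (Int × Int)) (inicio : Int × Int) (fin : Int × Int) : Prop :=
  lista.length ≠ 1 ∧ lista.length ≠ 2
instance (lista : List (Int × Int)) (inicio : Int × Int) (fin : Int × Int) : Decidable (Pre_rutas_sprite lista inicio fin) := by unfold Pre_rutas_sprite; infer_instance
def pvWitness_rutas_sprite : (List (Int × Int)) × (Int × Int) × (Int × Int) :=
  ([(1, 1), (2, 1), (2, 2)], (0, 1), (2, 3))
def Spec_rutas_sprite (lista : List (Int × Int)) (inicio : Int × Int) (fin : Int × Int) (out : Option (List Int)) : Prop := out = rutas_sprite_alt lista inicio fin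
instance (lista : List (Int × Int)) (inicio : Int × Int) (fin : Int × Int) (out : Option (List Int)) : Decidable (Spec_rutas_sprite lista inicio fin out) := by unfold Spec_rutas_sprite; infer_instance

-- ===== CLAIM =====
def Claim_equal_rutas_sprite : Prop := ∀ (lista : List (Int × Int)) (inicio : Int × Int) (fin : Int × Int), Dom_rutas_sprite lista inicio fin → Pre_rutas_sprite lista inicio fin → Spec_rutas_sprite lista inicio fin (rutas_sprite lista inicio fin)

-- ===== LEMMAS AND PROOFS =====

-- the two literal dicts, flattened
theorem CODEd_eq : CODEd = PySem.Dict.mk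
  [((some 'L', some 'L'), 1), ((some 'R', some 'R'), 0), ((some 'U', some 'U'), 3), ((some 'D', some 'D'), 2),
   ((some 'L', some 'D'), 4), ((some 'U', some 'R'), 4),
   ((some 'U', some 'L'), 5), ((some 'R', some 'D'), 5),
   ((some 'R', some 'U'), 6), ((some 'D', some 'L'), 6),
   ((some 'D', some 'R'), 7), ((some 'L', some 'U'), 7)] := by decide

theorem get?_DIRd (v : Int × Int) : DIRd.get? v =
    if v = (-1, 0) then some 'L' else if v = (1, 0) then some 'R'
    else if v = (0, 1) then some 'U' else if v = (0, -1) then some 'D' else none := by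
  rw [show DIRd = PySem.Dict.mk [((-1,0),'L'),((1,0),'R'),((0,1),'U'),((0,-1),'D')] from by decide]
  rw [PySem.Dict.get?_mk_cons, PySem.Dict.get?_mk_cons, PySem.Dict.get?_mk_cons, PySem.Dict.get?_mk_cons]
  simp [PySem.Dict.get?, beq_iff_eq, @eq_comm _ v]

theorem CODEd_none_left (y : Option Char) : CODEd.getD (none, y) (-1) = -1 := by
  rw [PySem.Dict.getD_eq_get?_getD, CODEd_eq]
  rw [PySem.Dict.get?_mk_cons, if_neg (by simp), PySem.Dict.get?_mk_cons, if_neg (by simp),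
      PySem.Dict.get?_mk_cons, if_neg (by simp), PySem.Dict.get?_mk_cons, if_neg (by simp),
      PySem.Dict.get?_mk_cons, if_neg (by simp), PySem.Dict.get?_mk_cons, if_neg (by simp),
      PySem.Dict.get?_mk_cons, if_neg (by simp), PySem.Dict.get?_mk_cons, if_neg (by simp),
      PySem.Dict.get?_mk_cons, if_neg (by simp), PySem.Dict.get?_mk_cons, if_neg (by simp),
      PySem.Dict.get?_mk_cons, if_neg (by simp), PySem.Dict.get?_mk_cons, if_neg (by simp)]
  rfl

theorem CODEd_none_right (x : Option Char) : CODEd.getD (x, none) (-1) = -1 := by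
  rw [PySem.Dict.getD_eq_get?_getD, CODEd_eq]
  rw [PySem.Dict.get?_mk_cons, if_neg (by simp), PySem.Dict.get?_mk_cons, if_neg (by simp),
      PySem.Dict.get?_mk_cons, if_neg (by simp), PySem.Dict.get?_mk_cons, if_neg (by simp),
      PySem.Dict.get?_mk_cons, if_neg (by simp), PySem.Dict.get?_mk_cons, if_neg (by simp),
      PySem.Dict.get?_mk_cons, if_neg (by simp), PySem.Dict.get?_mk_cons, if_neg (by simp),
      PySem.Dict.get?_mk_cons, if_neg (by simp), PySem.Dict.get?_mk_cons, if_neg (by simp),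
      PySem.Dict.get?_mk_cons, if_neg (by simp), PySem.Dict.get?_mk_cons, if_neg (by simp)]
  rfl

-- A's chain returns -1 when the incoming step is not a unit step
theorem numRuta_left (a b c d : Int) (h1 : ¬(a = -1 ∧ b = 0)) (h2 : ¬(a = 1 ∧ b = 0))
    (h3 : ¬(a = 0 ∧ b = 1)) (h4 : ¬(a = 0 ∧ b = -1)) : numRuta (a, b, c, d) = -1 := by
  rw [numRuta]
  rw [if_neg (by simp only [Prod.mk.injEq]; omega), if_neg (by simp only [Prod.mk.injEq]; omega),
      if_neg (by simp only [Prod.mk.injEq]; omega), if_neg (by simp only [Prod.mk.injEq]; omega),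
      if_neg (by simp only [Prod.mk.injEq]; omega), if_neg (by simp only [Prod.mk.injEq]; omega),
      if_neg (by simp only [Prod.mk.injEq]; omega), if_neg (by simp only [Prod.mk.injEq]; omega)]

-- and likewise when the (negated) outgoing step is not a unit step
theorem numRuta_right (a b c d : Int) (h1 : ¬(c = 1 ∧ d = 0)) (h2 : ¬(c = -1 ∧ d = 0))
    (h3 : ¬(c = 0 ∧ d = 1)) (h4 : ¬(c = 0 ∧ d = -1)) : numRuta (a, b, c, d) = -1 := by
  rw [numRuta]
  rw [if_neg (by simp only [Prod.mk.injEq]; omega), if_neg (by simp only [Prod.mk.injEq]; omega),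
      if_neg (by simp only [Prod.mk.injEq]; omega), if_neg (by simp only [Prod.mk.injEq]; omega),
      if_neg (by simp only [Prod.mk.injEq]; omega), if_neg (by simp only [Prod.mk.injEq]; omega),
      if_neg (by simp only [Prod.mk.injEq]; omega), if_neg (by simp only [Prod.mk.injEq]; omega)]

-- the key pointwise fact: B's two-stage table lookup equals A's 4-tuple chain
theorem pc (u w : Int × Int) :
    CODEd.getD (DIRd.get? u, DIRd.get? w) (-1) = numRuta (u.1, u.2, -w.1, -w.2) := by
  have hcase : ∀ (v : Int × Int), v = (-1,0) ∨ v = (1,0) ∨ v = (0,1) ∨ v = (0,-1) ∨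
      (v ≠ (-1,0) ∧ v ≠ (1,0) ∧ v ≠ (0,1) ∧ v ≠ (0,-1)) := by tauto
  rcases hcase u with rfl | rfl | rfl | rfl | ⟨hu1, hu2, hu3, hu4⟩ <;>
    rcases hcase w with rfl | rfl | rfl | rfl | ⟨hw1, hw2, hw3, hw4⟩ <;>
    first
    | decide
    | (rw [get?_DIRd u, if_neg hu1, if_neg hu2, if_neg hu3, if_neg hu4, CODEd_none_left]
       simp [Prod.ext_iff] at hu1 hu2 hu3 hu4
       exact (numRuta_left _ _ _ _ (by omega) (by omega) (by omega) (by omega)).symm)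
    | (rw [get?_DIRd w, if_neg hw1, if_neg hw2, if_neg hw3, if_neg hw4, CODEd_none_right]
       simp [Prod.ext_iff] at hw1 hw2 hw3 hw4
       refine (numRuta_right _ _ _ _ ?_ ?_ ?_ ?_).symm <;> omega)

-- proof-side abbreviations for the two window shapes
def codigo (p q r : Int × Int) : Int := numRuta (q.1 - p.1, q.2 - p.2, q.1 - r.1, q.2 - r.2)
def dcode (a b : Int × Int) : Option Char := DIRd.get? (b.1 - a.1, b.2 - a.2)
def pcode (x y : Option Char) : Int := CODEd.getD (x, y) (-1)

theorem pcode_dcode (p q r : Int × Int) : pcode (dcode p q) (dcode q r) = codigo p q r := by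
  have h := pc (q.1 - p.1, q.2 - p.2) (r.1 - q.1, r.2 - q.2)
  simpa [pcode, dcode, codigo, neg_sub] using h

theorem zip2_len {α β : Type} (xs : List α) (f : α → α → β) :
    ((xs.zip (xs.drop 1)).map (fun t => f t.1 t.2)).length = xs.length - 1 := by
  simp [List.length_zip]

theorem zip2_getElem {α β : Type} (xs : List α) (f : α → α → β) (k : Nat)
    (hk : k + 1 < xs.length) :
    ((xs.zip (xs.drop 1)).map (fun t => f t.1 t.2))[k]'(by rw [zip2_len]; omega)
      = f (xs[k]'(by omega)) (xs[k+1]'(by omega)) := by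
  simp [List.getElem_zip]

theorem zip3_len {α β : Type} (xs : List α) (f : α → α → α → β) :
    ((xs.zip ((xs.drop 1).zip (xs.drop 2))).map (fun t => f t.1 t.2.1 t.2.2)).length
      = xs.length - 2 := by
  simp [List.length_zip]; omega

theorem zip3_getElem {α β : Type} (xs : List α) (f : α → α → α → β) (k : Nat)
    (hk : k + 2 < xs.length) :
    ((xs.zip ((xs.drop 1).zip (xs.drop 2))).map (fun t => f t.1 t.2.1 t.2.2))[k]'(by
        rw [zip3_len]; omega)
      = f (xs[k]'(by omega)) (xs[k+1]'(by omega)) (xs[k+2]'(by omega)) := by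
  simp [List.getElem_zip, List.getElem_drop, Nat.add_comm]

theorem eIdx {α : Type} (l : List α) (i i' : Nat) (h : i < l.length) (e : i = i') :
    l[i]'h = l[i']'(e ▸ h) := by subst e; rfl

-- A's len>2 branch, rewritten as one sliding-window map over the padded path
theorem big_case (lista : List (Int × Int)) (inicio fin : Int × Int) (hn : 3 ≤ lista.length) :
    (let z : Int × Int := (0, 0)
     let l0 := lista.getD 0 z
     let l1 := lista.getD 1 z
     let spri0 := [numRuta (l0.1 - inicio.1, l0.2 - inicio.2, l0.1 - l1.1, l0.2 - l1.2)]
     let spri := (PySem.List.pyRange 1 ((lista.length : Int) - 1) 1).foldl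
       (fun acc i => acc ++ [numRuta
          ((PySem.List.pyGetD lista i z).1 - (PySem.List.pyGetD lista (i - 1) z).1,
           (PySem.List.pyGetD lista i z).2 - (PySem.List.pyGetD lista (i - 1) z).2,
           (PySem.List.pyGetD lista i z).1 - (PySem.List.pyGetD lista (i + 1) z).1,
           (PySem.List.pyGetD lista i z).2 - (PySem.List.pyGetD lista (i + 1) z).2)]) spri0
     let lm1 := PySem.List.pyGetD lista (-1) z
     let lm2 := PySem.List.pyGetD lista (-2) z
     spri ++ [numRuta (lm1.1 - lm2.1, lm1.2 - lm2.2, lm1.1 - fin.1, lm1.2 - fin.2)])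
    = (let pts := inicio :: (lista ++ [fin])
       (pts.zip ((pts.drop 1).zip (pts.drop 2))).map (fun t => codigo t.1 t.2.1 t.2.2)) := by
  simp only [PySem.List.foldl_append_singleton_eq_map]
  have ePts : ∀ (j : Nat) (hj : j < lista.length),
      (inicio :: (lista ++ [fin]))[j+1]'(by simp; omega) = lista[j]'hj := by
    intro j hj
    simp only [List.getElem_cons_succ]
    exact List.getElem_append_left hj
  apply List.ext_getElem
  · rw [zip3_len]
    simp [PySem.List.length_pyRange_one]
    omega
  intro k h1 h2
  have hk : k < lista.length := by
    have := h2; rw [zip3_len] at this; simp at this; omega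
  have hk2 : k + 2 < (inicio :: (lista ++ [fin])).length := by simp; omega
  rw [zip3_getElem (inicio :: (lista ++ [fin])) codigo k hk2]
  by_cases hk0 : k = 0
  · subst hk0
    rw [ePts 0 (by omega), ePts 1 (by omega)]
    rw [List.getD_eq_getElem lista (0,0) (by omega : 0 < lista.length)]
    rw [List.getD_eq_getElem lista (0,0) (by omega : 1 < lista.length)]
    simp [codigo]
  · obtain ⟨j, rfl⟩ := Nat.exists_eq_succ_of_ne_zero hk0
    rw [ePts (j+1) (by omega)]
    rw [ePts j (by omega)]
    simp only [List.singleton_append, List.getElem_cons_succ]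
    by_cases hklast : j + 1 = lista.length - 1
    · -- last position of the loop output
      rw [List.getElem_append_right (show lista.length ≤ j + 2 by omega)]
      rw [List.getElem_singleton]
      rw [List.getElem_append_right (by simp [PySem.List.length_pyRange_one]; omega)]
      rw [List.getElem_singleton]
      rw [PySem.List.pyGetD_neg_ofNat lista 1 (0,0) (by omega) (by omega)]
      rw [PySem.List.pyGetD_neg_ofNat lista 2 (0,0) (by omega) (by omega)]
      rw [eIdx lista (lista.length - 1) (j+1) (by omega) (by omega)]
      rw [eIdx lista (lista.length - 2) j (by omega) (by omega)]
      simp only [codigo]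
    · -- middle position of the loop output
      rw [List.getElem_append_left (show j + 2 < lista.length by omega)]
      rw [List.getElem_append_left (by simp [PySem.List.length_pyRange_one]; omega)]
      simp only [List.getElem_cons_succ]
      rw [List.getElem_map, PySem.List.getElem_pyRange_one 1 ((lista.length : Int) - 1) j
        (by simp [PySem.List.length_pyRange_one]; omega)]
      rw [PySem.List.pyGetD_eq_getElem lista (0,0) (by omega) (by omega)]
      rw [show (1 + (j:Int)) - 1 = ((j:Nat) : Int) from by omega]
      rw [show (1 + (j:Int)) + 1 = (((j+2:Nat)) : Int) from by push_cast; omega]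
      rw [PySem.List.pyGetD_eq_getElem lista (0,0) (by omega) (by omega)]
      rw [PySem.List.pyGetD_eq_getElem lista (0,0) (by omega) (by omega)]
      rw [eIdx lista ((1 + (j:Int)).toNat) (j+1) (by omega) (by omega)]
      rw [eIdx lista (((j:Nat) : Int).toNat) j (by omega) (by omega)]
      rw [eIdx lista ((((j+2:Nat)) : Int).toNat) (j+2) (by omega) (by omega)]
      simp only [codigo]

-- B's two staged passes collapse to the same sliding-window map
theorem bridge (pts : List (Int × Int)) :
    ((((pts.zip (pts.drop 1)).map (fun t => dcode t.1 t.2)).zip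
        (((pts.zip (pts.drop 1)).map (fun t => dcode t.1 t.2)).drop 1)).map (fun t => pcode t.1 t.2))
      = (pts.zip ((pts.drop 1).zip (pts.drop 2))).map (fun t => codigo t.1 t.2.1 t.2.2) := by
  apply List.ext_getElem
  · rw [zip2_len, zip2_len, zip3_len]; omega
  intro k h1 h2
  have hk : k + 2 < pts.length := by rw [zip3_len] at h2; omega
  have hd : k + 1 < ((pts.zip (pts.drop 1)).map (fun t => dcode t.1 t.2)).length := by
    rw [zip2_len]; omega
  rw [zip2_getElem ((pts.zip (pts.drop 1)).map (fun t => dcode t.1 t.2)) pcode k hd]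
  rw [zip2_getElem pts dcode k (by omega), zip2_getElem pts dcode (k+1) (by omega)]
  rw [zip3_getElem pts codigo k hk]
  exact pcode_dcode _ _ _

theorem main_eq (lista : List (Int × Int)) (inicio fin : Int × Int)
    (h1 : lista.length ≠ 1) (h2 : lista.length ≠ 2) :
    rutas_sprite lista inicio fin = rutas_sprite_alt lista inicio fin := by
  unfold rutas_sprite rutas_sprite_alt
  by_cases h0 : lista.length = 0
  · obtain rfl := List.length_eq_zero_iff.mp h0
    rfl
  · have hn : 3 ≤ lista.length := by omega
    rw [if_neg h0, if_neg h1, if_neg h2]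
    exact congrArg some
      ((big_case lista inicio fin hn).trans (bridge (inicio :: (lista ++ [fin]))).symm)

-- ===== VERDICT (by name: the statement is the Claim_ definition above) =====
theorem rutas_sprite_spec : Claim_equal_rutas_sprite := by
  intro lista inicio fin _ hpre
  unfold Spec_rutas_sprite
  exact main_eq lista inicio fin hpre.1 hpre.2
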